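-- pv_equiv track=rewrite | github.com/vladpi/advent-of-code-2023 | day10/part_1.py | find_s_ouputs
-- ===== SOURCE A (Python) =====
-- def find_s_ouputs(data: list[str], s_i: int, s_j: int) -> list[tuple[int, int]]:
--     ouputs = []
--
--     for i_coef, j_coef in [
--         (-1, -1),
--         (-1, 0),
--         (-1, +1),
--         (0, -1),
--         (0, +1),
--         (+1, -1),
--         (+1, 0),
--         (+1, +1),
--     ]:
--         pipe = get_pipe(data, s_i + i_coef, s_j + j_coef)
--         if pipe is not None:
--             pipe_coefs = get_input_ouput(pipe, s_i + i_coef, s_j + j_coef)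
--             if (s_i, s_j) in pipe_coefs:
--                 ouputs.append((s_i + i_coef, s_j + j_coef))
--
--     return ouputs
--
-- def get_pipe(data: list[str], i: int, j: int) -> str | None:
--     try:
--         return data[i][j]
--     except IndexError:
--         return None
--
-- def get_input_ouput(pipe: str, i: int, j: int) -> list[tuple[int, int]]:
--     coefs_map = {
--         "|": [(i - 1, j), (i + 1, j)],
--         "-": [(i, j - 1), (i, j + 1)],
--         "L": [(i - 1, j), (i, j + 1)],
--         "J": [(i - 1, j), (i, j - 1)],
--         "7": [(i, j - 1), (i + 1, j)],
--         "F": [(i, j + 1), (i + 1, j)],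
--         ".": [],
--     }
--     return coefs_map[pipe]
-- ===== SOURCE B (Python) =====
-- def get_pipe(data, i, j):
--     try:
--         return data[i][j]
--     except IndexError:
--         return None
--
--
-- # For each orthogonal direction from S, the pipe characters that open back toward S.
-- _DIR_OPENERS = [
--     ((-1, 0), "|7F"),  # north
--     ((0, -1), "-LF"),  # west
--     ((0, 1), "-J7"),   # east
--     ((1, 0), "|LJ"),   # south
-- ]
--
--
-- def find_s_ouputs(data: list[str], s_i: int, s_j: int) -> list[tuple[int, int]]:
--     ouputs = []
--     for (di, dj), openers in _DIR_OPENERS: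
--         pipe = get_pipe(data, s_i + di, s_j + dj)
--         if pipe is not None and pipe in openers:
--             ouputs.append((s_i + di, s_j + dj))
--     return ouputs
-- ===== Notes on version B (the rewrite author's own statement) =====
-- stated objective: simpler
-- what changed: B replaces the 8-neighbour scan with per-neighbour construction of a coordinate list and coordinate membership test by a 4-entry direction-to-opening-characters table: it visits only the 4 orthogonal neighbours and tests the fetched character against that direction's opener set, so the diagonal no-op iterations, the dict of coordinate lists and the tuple membership test disappear.
-- outside the precondition, e.g. on find_s_ouputs(['S'], 0, 1): A raises KeyError, B returns []
import Mathlib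
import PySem

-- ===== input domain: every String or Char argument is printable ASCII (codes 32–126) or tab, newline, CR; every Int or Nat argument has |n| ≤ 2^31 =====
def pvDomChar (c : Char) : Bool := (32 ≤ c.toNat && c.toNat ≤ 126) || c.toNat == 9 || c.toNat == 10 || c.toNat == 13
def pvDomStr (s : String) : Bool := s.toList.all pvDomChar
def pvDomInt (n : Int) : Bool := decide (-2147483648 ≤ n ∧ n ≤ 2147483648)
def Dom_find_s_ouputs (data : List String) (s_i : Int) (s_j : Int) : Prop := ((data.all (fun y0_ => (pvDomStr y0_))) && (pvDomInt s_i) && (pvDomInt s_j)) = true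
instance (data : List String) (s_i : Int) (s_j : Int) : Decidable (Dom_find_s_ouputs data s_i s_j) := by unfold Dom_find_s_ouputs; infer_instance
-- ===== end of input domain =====

-- ===== PORT A =====
-- B replaces the 8-neighbour coordinate-list membership scan by a 4-entry direction->opening-characters
-- table over the orthogonal neighbours only (objective: simpler).

-- data[i][j] with 'except IndexError: return None'; pyGet? is none exactly on IndexError
def get_pipe (data : List String) (i : Int) (j : Int) : Option Char :=
  match PySem.List.pyGet? data i with
  | none => none
  | some row => PySem.Str.pyGet? row j

-- the dict literal of get_input_ouput; get? = dict lookup, none = KeyError (excluded by Pre_)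
def get_input_ouput? (pipe : Char) (i : Int) (j : Int) : Option (List (Int × Int)) :=
  (PySem.Dict.ofList
    [('|', [(i - 1, j), (i + 1, j)]),
     ('-', [(i, j - 1), (i, j + 1)]),
     ('L', [(i - 1, j), (i, j + 1)]),
     ('J', [(i - 1, j), (i, j - 1)]),
     ('7', [(i, j - 1), (i + 1, j)]),
     ('F', [(i, j + 1), (i + 1, j)]),
     ('.', ([] : List (Int × Int)))]).get? pipe

def neighborOffsets : List (Int × Int) :=
  [(-1, -1), (-1, 0), (-1, 1), (0, -1), (0, 1), (1, -1), (1, 0), (1, 1)]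

def find_s_ouputs (data : List String) (s_i : Int) (s_j : Int) : List (Int × Int) :=
  neighborOffsets.foldl
    (fun ouputs c =>
      match get_pipe data (s_i + c.1) (s_j + c.2) with
      | none => ouputs
      | some pipe =>
        match get_input_ouput? pipe (s_i + c.1) (s_j + c.2) with
        | none => ouputs  -- KeyError in Python; outside Pre_
        | some pipe_coefs =>
          if (s_i, s_j) ∈ pipe_coefs then ouputs ++ [(s_i + c.1, s_j + c.2)] else ouputs)
    []

-- ===== PORT B =====
-- _DIR_OPENERS: per orthogonal direction, the pipe chars opening back toward S
-- ('pipe in openers' on a 1-char pipe and a short string = char membership)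
def dirOpeners : List ((Int × Int) × List Char) :=
  [((-1, 0), ['|', '7', 'F']),
   ((0, -1), ['-', 'L', 'F']),
   ((0, 1),  ['-', 'J', '7']),
   ((1, 0),  ['|', 'L', 'J'])]

def find_s_ouputs_alt (data : List String) (s_i : Int) (s_j : Int) : List (Int × Int) :=
  dirOpeners.foldl
    (fun ouputs e =>
      match get_pipe data (s_i + e.1.1) (s_j + e.1.2) with
      | some pipe => if pipe ∈ e.2 then ouputs ++ [(s_i + e.1.1, s_j + e.1.2)] else ouputs
      | none => ouputs)
    []

-- ===== PRECONDITION & SPEC =====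
def pipeChars : List Char := ['|', '-', 'L', 'J', '7', 'F', '.']

def okPipe (o : Option Char) : Bool :=
  match o with
  | none => true
  | some c => pipeChars.contains c

-- Pre_ excludes exactly the inputs where some of the 8 (wrap-indexed) neighbour cells of (s_i, s_j)
-- holds a character outside "|-LJ7F.", on which Python A raises KeyError in get_input_ouput.
def Pre_find_s_ouputs (data : List String) (s_i : Int) (s_j : Int) : Prop :=
  (neighborOffsets.all fun c => okPipe (get_pipe data (s_i + c.1) (s_j + c.2))) = true

instance (data : List String) (s_i : Int) (s_j : Int) : Decidable (Pre_find_s_ouputs data s_i s_j) := by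
  unfold Pre_find_s_ouputs; infer_instance

def pvWitness_find_s_ouputs : List String × Int × Int := (["|"], 1, 0)

def Spec_find_s_ouputs (data : List String) (s_i : Int) (s_j : Int) (out : List (Int × Int)) : Prop :=
  out = find_s_ouputs_alt data s_i s_j

instance (data : List String) (s_i : Int) (s_j : Int) (out : List (Int × Int)) : Decidable (Spec_find_s_ouputs data s_i s_j out) := by
  unfold Spec_find_s_ouputs; infer_instance

-- ===== CLAIM (what is proved, stated in full; the proofs are below) =====
def Claim_equal_find_s_ouputs : Prop := ∀ (data : List String) (s_i : Int) (s_j : Int), Dom_find_s_ouputs data s_i s_j → Pre_find_s_ouputs data s_i s_j → Spec_find_s_ouputs data s_i s_j (find_s_ouputs data s_i s_j)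

-- ===== LEMMAS AND PROOFS =====

-- one iteration of A's loop, as the list it appends
def stepA (data : List String) (s_i s_j di dj : Int) : List (Int × Int) :=
  match get_pipe data (s_i + di) (s_j + dj) with
  | none => []
  | some pipe =>
    match get_input_ouput? pipe (s_i + di) (s_j + dj) with
    | none => []
    | some pipe_coefs => if (s_i, s_j) ∈ pipe_coefs then [(s_i + di, s_j + dj)] else []

-- one iteration of B's loop, as the list it appends
def stepB (data : List String) (s_i s_j di dj : Int) (opens : List Char) : List (Int × Int) :=
  match get_pipe data (s_i + di) (s_j + dj) with
  | some pipe => if pipe ∈ opens then [(s_i + di, s_j + dj)] else []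
  | none => []

-- evaluations of the dict lookup on each valid pipe char
theorem gi_vert (i j : Int) : get_input_ouput? '|' i j = some [(i - 1, j), (i + 1, j)] := rfl
theorem gi_horiz (i j : Int) : get_input_ouput? '-' i j = some [(i, j - 1), (i, j + 1)] := rfl
theorem gi_L (i j : Int) : get_input_ouput? 'L' i j = some [(i - 1, j), (i, j + 1)] := rfl
theorem gi_J (i j : Int) : get_input_ouput? 'J' i j = some [(i - 1, j), (i, j - 1)] := rfl
theorem gi_7 (i j : Int) : get_input_ouput? '7' i j = some [(i, j - 1), (i + 1, j)] := rfl
theorem gi_F (i j : Int) : get_input_ouput? 'F' i j = some [(i, j + 1), (i + 1, j)] := rfl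
theorem gi_dot (i j : Int) : get_input_ouput? '.' i j = some [] := rfl

theorem foldA (data : List String) (s_i s_j : Int) :
    find_s_ouputs data s_i s_j =
      neighborOffsets.flatMap (fun c => stepA data s_i s_j c.1 c.2) := by
  unfold find_s_ouputs
  have h : (fun (ouputs : List (Int × Int)) (c : Int × Int) =>
      match get_pipe data (s_i + c.1) (s_j + c.2) with
      | none => ouputs
      | some pipe =>
        match get_input_ouput? pipe (s_i + c.1) (s_j + c.2) with
        | none => ouputs
        | some pipe_coefs =>
          if (s_i, s_j) ∈ pipe_coefs then ouputs ++ [(s_i + c.1, s_j + c.2)] else ouputs)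
      = fun ouputs c => ouputs ++ stepA data s_i s_j c.1 c.2 := by
    funext ouputs c
    unfold stepA
    rcases hg : get_pipe data (s_i + c.1) (s_j + c.2) with _ | pipe <;> simp only [hg]
    · simp
    · rcases hc : get_input_ouput? pipe (s_i + c.1) (s_j + c.2) with _ | cs <;> simp only [hc]
      · simp
      · by_cases hm : (s_i, s_j) ∈ cs <;> simp [hm]
  rw [h, PySem.List.foldl_append_eq_flatMap]
  simp

theorem foldB (data : List String) (s_i s_j : Int) :
    find_s_ouputs_alt data s_i s_j =
      dirOpeners.flatMap (fun e => stepB data s_i s_j e.1.1 e.1.2 e.2) := by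
  unfold find_s_ouputs_alt
  have h : (fun (ouputs : List (Int × Int)) (e : (Int × Int) × List Char) =>
      match get_pipe data (s_i + e.1.1) (s_j + e.1.2) with
      | some pipe => if pipe ∈ e.2 then ouputs ++ [(s_i + e.1.1, s_j + e.1.2)] else ouputs
      | none => ouputs)
      = fun ouputs e => ouputs ++ stepB data s_i s_j e.1.1 e.1.2 e.2 := by
    funext ouputs e
    unfold stepB
    rcases hg : get_pipe data (s_i + e.1.1) (s_j + e.1.2) with _ | pipe <;> simp only [hg]
    · simp
    · by_cases hm : pipe ∈ e.2 <;> simp [hm]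
  rw [h, PySem.List.foldl_append_eq_flatMap]
  simp

-- a valid pipe char at a diagonal neighbour never lists S among its ends
theorem stepA_diag (data : List String) (s_i s_j di dj : Int)
    (hdi : di = -1 ∨ di = 1) (hdj : dj = -1 ∨ dj = 1)
    (hok : okPipe (get_pipe data (s_i + di) (s_j + dj)) = true) :
    stepA data s_i s_j di dj = [] := by
  unfold stepA
  rcases hp : get_pipe data (s_i + di) (s_j + dj) with _ | pipe
  · rfl
  rw [hp] at hok
  simp only [okPipe, pipeChars, List.contains_eq_mem, decide_eq_true_eq] at hok
  rcases hdi with h1 | h1 <;> rcases hdj with h2 | h2 <;> subst h1 <;> subst h2 <;>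
    fin_cases hok <;>
    simp only [gi_vert, gi_horiz, gi_L, gi_J, gi_7, gi_F, gi_dot] <;>
    norm_num [List.mem_cons]

-- a valid pipe char at an orthogonal neighbour lists S iff it is in that direction's opener set
theorem stepA_orth (data : List String) (s_i s_j di dj : Int) (opens : List Char)
    (htab : ((di, dj), opens) ∈ dirOpeners)
    (hok : okPipe (get_pipe data (s_i + di) (s_j + dj)) = true) :
    stepA data s_i s_j di dj = stepB data s_i s_j di dj opens := by
  unfold stepA stepB
  rcases hp : get_pipe data (s_i + di) (s_j + dj) with _ | pipe
  · rfl
  rw [hp] at hok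
  simp only [okPipe, pipeChars, List.contains_eq_mem, decide_eq_true_eq] at hok
  simp only [dirOpeners, List.mem_cons, List.not_mem_nil, or_false, Prod.mk.injEq] at htab
  rcases htab with ⟨⟨h1, h2⟩, h3⟩ | ⟨⟨h1, h2⟩, h3⟩ | ⟨⟨h1, h2⟩, h3⟩ | ⟨⟨h1, h2⟩, h3⟩ <;>
    subst h1 <;> subst h2 <;> subst h3 <;>
    fin_cases hok <;>
    simp only [gi_vert, gi_horiz, gi_L, gi_J, gi_7, gi_F, gi_dot] <;>
    norm_num [List.mem_cons] <;>
    first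
      | decide
      | (split_ifs <;> first | rfl | omega | simp_all)

-- ===== VERDICT (by name: the statement is the Claim_ definition above) =====
theorem find_s_ouputs_spec : Claim_equal_find_s_ouputs := by
  intro data s_i s_j _hdom hpre
  unfold Spec_find_s_ouputs
  unfold Pre_find_s_ouputs at hpre
  simp only [neighborOffsets, List.all_cons, List.all_nil, Bool.and_eq_true, and_true] at hpre
  obtain ⟨o1, o2, o3, o4, o5, o6, o7, o8⟩ := hpre
  rw [foldA, foldB]
  simp only [neighborOffsets, dirOpeners, List.flatMap_cons, List.flatMap_nil, List.append_nil]
  rw [stepA_diag data s_i s_j (-1) (-1) (Or.inl rfl) (Or.inl rfl) o1,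
      stepA_diag data s_i s_j (-1) 1 (Or.inl rfl) (Or.inr rfl) o3,
      stepA_diag data s_i s_j 1 (-1) (Or.inr rfl) (Or.inl rfl) o6,
      stepA_diag data s_i s_j 1 1 (Or.inr rfl) (Or.inr rfl) o8,
      stepA_orth data s_i s_j (-1) 0 ['|', '7', 'F'] (by decide) o2,
      stepA_orth data s_i s_j 0 (-1) ['-', 'L', 'F'] (by decide) o4,
      stepA_orth data s_i s_j 0 1 ['-', 'J', '7'] (by decide) o5,
      stepA_orth data s_i s_j 1 0 ['|', 'L', 'J'] (by decide) o7]
  simp
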